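-- pv_equiv track=rewrite | github.com/Yotampd/Neural-Minimum-Weight-Perfect-Matching-For-Quantum-Error-Codes | Rotated_GT.py | solve_cluster_brute_force
-- ===== SOURCE A (Python) =====
-- def solve_cluster_brute_force(nodes, target_p, edge_log, bound_log, virt_id):
--     def generate_matchings(pool):
--         if not pool:
--             yield []
--             return
--
--         first = pool[0]
--         rest = pool[1:]
--
--         for i, mate in enumerate(rest):
--             pair = tuple(sorted((first, mate)))
--             remaining = rest[:i] + rest[i+1:]
--
--             for partial in generate_matchings(remaining):
--                 yield [pair] + partial
--
--     def get_parity(matching):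
--         p = 0
--         for u, v in matching:
--             if u == virt_id: p ^= bound_log.get(v, 0)
--             elif v == virt_id: p ^= bound_log.get(u, 0)
--             else: p ^= edge_log.get((min(u,v), max(u,v)), 0)
--         return p
--
--     for m in generate_matchings(nodes):
--         if get_parity(m) == target_p:
--             return m
--
--     return None
-- ===== SOURCE B (Python) =====
-- def solve_cluster_brute_force(nodes, target_p, edge_log, bound_log, virt_id):
--     def weight(u, v):  # u <= v already
--         if u == virt_id:
--             return bound_log.get(v, 0)
--         if v == virt_id:
--             return bound_log.get(u, 0)
--         return edge_log.get((u, v), 0)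
--
--     # iterative depth-first search with an explicit stack; each frame carries the
--     # remaining pool, the parity accumulated so far, and the pairs chosen so far
--     stack = [(list(nodes), 0, [])]
--     while stack:
--         pool, acc, chosen = stack.pop()
--         if not pool:
--             if acc == target_p:
--                 return chosen
--             continue
--         first, rest = pool[0], pool[1:]
--         for i in range(len(rest) - 1, -1, -1):  # reversed so i = 0 is explored first
--             mate = rest[i]
--             u, v = (first, mate) if first <= mate else (mate, first)
--             stack.append((rest[:i] + rest[i + 1:], acc ^ weight(u, v), chosen + [(u, v)]))
--     return None
-- ===== Notes on version B (the rewrite author's own statement) =====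
-- stated objective: alternative
-- what changed: A is a recursive generator that lazily enumerates every complete matching and then recomputes each matching's parity from scratch; B replaces the recursion entirely with an iterative depth-first search over an explicit stack of (pool, accumulated-parity, chosen-pairs) frames, threading the XOR parity incrementally and testing only at the leaves.
import Mathlib
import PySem

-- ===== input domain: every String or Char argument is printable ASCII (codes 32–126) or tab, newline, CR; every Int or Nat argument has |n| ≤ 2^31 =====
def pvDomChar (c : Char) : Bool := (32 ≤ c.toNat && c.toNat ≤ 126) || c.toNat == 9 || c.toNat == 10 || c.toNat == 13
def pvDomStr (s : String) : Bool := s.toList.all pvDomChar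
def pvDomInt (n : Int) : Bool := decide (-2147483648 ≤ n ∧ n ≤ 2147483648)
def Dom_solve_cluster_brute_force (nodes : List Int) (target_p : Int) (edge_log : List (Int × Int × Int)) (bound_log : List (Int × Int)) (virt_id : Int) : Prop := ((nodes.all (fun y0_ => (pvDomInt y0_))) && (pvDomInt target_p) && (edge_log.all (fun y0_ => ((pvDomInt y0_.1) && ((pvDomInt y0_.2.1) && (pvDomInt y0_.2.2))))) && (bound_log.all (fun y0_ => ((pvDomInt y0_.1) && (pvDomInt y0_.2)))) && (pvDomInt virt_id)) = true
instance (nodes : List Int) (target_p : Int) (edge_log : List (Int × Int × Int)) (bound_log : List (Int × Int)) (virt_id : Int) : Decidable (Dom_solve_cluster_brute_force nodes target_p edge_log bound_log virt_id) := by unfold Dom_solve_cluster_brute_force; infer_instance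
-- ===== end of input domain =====

-- B replaces A's recursive generate-then-test enumeration by an iterative depth-first
-- search over an explicit stack of (pool, accumulated parity, chosen pairs) frames.

-- ===== PORT A =====
-- dict.get with default 0; the Python dicts are assoc lists in insertion order (unique keys),
-- so first-match lookup is exact
def pvBGet (bl : List (Int × Int)) (k : Int) : Int :=
  match bl.find? (fun kv => kv.1 == k) with
  | some kv => kv.2
  | none => 0

def pvEGet (el : List (Int × Int × Int)) (k : Int × Int) : Int :=
  match el.find? (fun t => t.1 == k.1 && t.2.1 == k.2) with
  | some t => t.2.2
  | none => 0

-- the body of get_parity's loop: p ^= ...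
def pvStepA (edge_log : List (Int × Int × Int)) (bound_log : List (Int × Int)) (virt_id : Int)
    (p : Int) (uv : Int × Int) : Int :=
  if uv.1 == virt_id then PySem.Int.bxor p (pvBGet bound_log uv.2)
  else if uv.2 == virt_id then PySem.Int.bxor p (pvBGet bound_log uv.1)
  else PySem.Int.bxor p (pvEGet edge_log (min uv.1 uv.2, max uv.1 uv.2))

def pvGetParity (edge_log : List (Int × Int × Int)) (bound_log : List (Int × Int)) (virt_id : Int)
    (m : List (Int × Int)) : Int :=
  m.foldl (pvStepA edge_log bound_log virt_id) 0

-- generate_matchings with the generator materialised as the list of its yields; the recursion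
-- runs on a fuel counter (a pure totality guard: |pool| drops by 2 per level while fuel ≥ |pool|
-- drops by 1, so the 0-fuel branch is never reached from the entry point below); indices i from
-- enumerate satisfy 0 ≤ i < |rest|, so rest[:i] / rest[i+1:] are take/drop exactly
def pvGenMatchingsF (fuel : Nat) (pool : List Int) : List (List (Int × Int)) :=
  match fuel, pool with
  | _, [] => [[]]
  | 0, _ :: _ => []
  | fuel + 1, first :: rest =>
    (PySem.List.enumerate rest).flatMap (fun im =>
      (pvGenMatchingsF fuel (rest.take im.1.toNat ++ rest.drop (im.1.toNat + 1))).map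
        (fun partial_ => (if first ≤ im.2 then (first, im.2) else (im.2, first)) :: partial_))

-- the for-loop over generate_matchings with its early return
def solve_cluster_brute_force (nodes : List Int) (target_p : Int) (edge_log : List (Int × Int × Int)) (bound_log : List (Int × Int)) (virt_id : Int) : Option (List (Int × Int)) :=
  (pvGenMatchingsF nodes.length nodes).find?
    (fun m => pvGetParity edge_log bound_log virt_id m == target_p)

-- ===== PORT B =====
-- B's weight(u, v): called only with u ≤ v
def pvWeight (edge_log : List (Int × Int × Int)) (bound_log : List (Int × Int)) (virt_id : Int)
    (u v : Int) : Int :=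
  if u == virt_id then pvBGet bound_log v
  else if v == virt_id then pvBGet bound_log u
  else pvEGet edge_log (u, v)

-- number of loop iterations B's while-loop spends on a frame whose pool has m elements
-- (used only to size the fuel of the while-loop's port below)
def pvTsz : Nat → Nat
  | 0 => 1
  | 1 => 1
  | m + 2 => 1 + (m + 1) * pvTsz m

-- the while-loop; the Lean stack's HEAD is the Python list's END (the popped element), so
-- Python's reversed-range appends put child i = 0 on top == prepending the children in
-- forward order here; fuel is a totality guard only (the entry point supplies enough)
def pvLoopF (target_p : Int) (edge_log : List (Int × Int × Int)) (bound_log : List (Int × Int))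
    (virt_id : Int) : Nat → List (List Int × Int × List (Int × Int)) → Option (List (Int × Int))
  | _, [] => none
  | 0, _ :: _ => none
  | fuel + 1, (pool, acc, chosen) :: stack =>
    match pool with
    | [] =>
      if acc == target_p then some chosen
      else pvLoopF target_p edge_log bound_log virt_id fuel stack
    | first :: rest =>
      pvLoopF target_p edge_log bound_log virt_id fuel
        (((PySem.List.enumerate rest).map (fun im =>
            let uv := if first ≤ im.2 then (first, im.2) else (im.2, first)
            (rest.take im.1.toNat ++ rest.drop (im.1.toNat + 1),
             PySem.Int.bxor acc (pvWeight edge_log bound_log virt_id uv.1 uv.2),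
             chosen ++ [uv]))) ++ stack)

def solve_cluster_brute_force_alt (nodes : List Int) (target_p : Int) (edge_log : List (Int × Int × Int)) (bound_log : List (Int × Int)) (virt_id : Int) : Option (List (Int × Int)) :=
  pvLoopF target_p edge_log bound_log virt_id (pvTsz nodes.length) [(nodes, 0, [])]

-- ===== PRECONDITION & SPEC =====
def Spec_solve_cluster_brute_force (nodes : List Int) (target_p : Int) (edge_log : List (Int × Int × Int)) (bound_log : List (Int × Int)) (virt_id : Int) (out : Option (List (Int × Int))) : Prop := out = solve_cluster_brute_force_alt nodes target_p edge_log bound_log virt_id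
instance (nodes : List Int) (target_p : Int) (edge_log : List (Int × Int × Int)) (bound_log : List (Int × Int)) (virt_id : Int) (out : Option (List (Int × Int))) : Decidable (Spec_solve_cluster_brute_force nodes target_p edge_log bound_log virt_id out) := by unfold Spec_solve_cluster_brute_force; infer_instance

-- ===== CLAIM (what is proved, stated in full; the proofs are below) =====
def Claim_equal_solve_cluster_brute_force : Prop := ∀ (nodes : List Int) (target_p : Int) (edge_log : List (Int × Int × Int)) (bound_log : List (Int × Int)) (virt_id : Int), Dom_solve_cluster_brute_force nodes target_p edge_log bound_log virt_id → Spec_solve_cluster_brute_force nodes target_p edge_log bound_log virt_id (solve_cluster_brute_force nodes target_p edge_log bound_log virt_id)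

-- ===== LEMMAS AND PROOFS =====

-- what B's loop owes each stack frame: the first matching of the frame's pool whose parity,
-- continued from the frame's accumulator, hits the target, appended to the frame's chosen pairs
def pvFrameSpec (target_p : Int) (el : List (Int × Int × Int)) (bl : List (Int × Int))
    (virt : Int) (st : List Int × Int × List (Int × Int)) : Option (List (Int × Int)) :=
  ((pvGenMatchingsF st.1.length st.1).find?
      (fun m => m.foldl (pvStepA el bl virt) st.2.1 == target_p)).map (fun m => st.2.2 ++ m)

lemma pvTsz_pos (m : Nat) : 0 < pvTsz m := by
  match m with
  | 0 => simp [pvTsz]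
  | 1 => simp [pvTsz]
  | m + 2 => simp [pvTsz]

lemma pv_gen_nil (f : Nat) : pvGenMatchingsF f [] = [[]] := by cases f <;> rfl

lemma pv_len_child {rest : List Int} {k : Nat} (h : k < rest.length) :
    (rest.take k ++ rest.drop (k + 1)).length = rest.length - 1 := by
  simp [List.length_take, List.length_drop]; omega

-- A stores each pair already sorted, so A's loop-body weight equals B's weight on it
lemma pv_step_sorted (el : List (Int × Int × Int)) (bl : List (Int × Int)) (virt : Int)
    (acc u v : Int) (h : u ≤ v) :
    pvStepA el bl virt acc (u, v) = PySem.Int.bxor acc (pvWeight el bl virt u v) := by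
  simp only [pvStepA, pvWeight, min_def, max_def, if_pos h]
  split_ifs <;> rfl

lemma pv_flatMap_congr {α β : Type} (l : List α) (f g : α → List β)
    (h : ∀ a ∈ l, f a = g a) : l.flatMap f = l.flatMap g := by
  induction l with
  | nil => rfl
  | cons a l ih =>
    simp only [List.flatMap_cons, h a (List.mem_cons_self ..),
      ih (fun x hx => h x (List.mem_cons_of_mem _ hx))]

lemma pv_find?_flatMap {α β : Type} (l : List α) (f : α → List β) (p : β → Bool) :
    (l.flatMap f).find? p = l.findSome? (fun a => (f a).find? p) := by
  induction l with
  | nil => rfl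
  | cons a l ih =>
    cases h : (f a).find? p <;>
      simp [List.flatMap_cons, List.find?_append, h, ih]

lemma pv_findSome?_congr {α β : Type} (l : List α) (f g : α → Option β)
    (h : ∀ a ∈ l, f a = g a) : l.findSome? f = l.findSome? g := by
  induction l with
  | nil => rfl
  | cons a l ih =>
    simp only [List.findSome?_cons, h a (List.mem_cons_self ..)]
    cases g a with
    | some b => rfl
    | none => exact ih (fun x hx => h x (List.mem_cons_of_mem _ hx))

lemma pv_findSome?_append {α β : Type} (l1 l2 : List α) (f : α → Option β) :
    (l1 ++ l2).findSome? f
      = match l1.findSome? f with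
        | some b => some b
        | none => l2.findSome? f := by
  induction l1 with
  | nil => rfl
  | cons a l ih =>
    simp only [List.cons_append, List.findSome?_cons]
    cases f a with
    | some b => rfl
    | none => exact ih

lemma pv_map_findSome? {α β γ : Type} (l : List α) (f : α → Option β) (h : β → γ) :
    (l.findSome? f).map h = l.findSome? (fun a => (f a).map h) := by
  induction l with
  | nil => rfl
  | cons a l ih =>
    simp only [List.findSome?_cons]
    cases f a with
    | some b => rfl
    | none => exact ih

-- the fuel of A's materialised generator is irrelevant once it covers the pool's length
lemma pv_gen_fuel : ∀ (f g : Nat) (pool : List Int), pool.length ≤ f → pool.length ≤ g →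
    pvGenMatchingsF f pool = pvGenMatchingsF g pool := by
  intro f
  induction f with
  | zero =>
    intro g pool h1 _
    have : pool = [] := List.length_eq_zero_iff.mp (Nat.le_zero.mp h1)
    subst this; simp [pv_gen_nil]
  | succ f ih =>
    intro g pool h1 h2
    cases pool with
    | nil => simp [pv_gen_nil]
    | cons first rest =>
      cases g with
      | zero => simp at h2
      | succ g =>
        simp only [pvGenMatchingsF]
        apply pv_flatMap_congr
        intro im him
        obtain ⟨k, hk, rfl⟩ := (PySem.List.mem_enumerate_iff rest 0 im).mp him
        have hkt : ((0 : Int) + (k : Int)).toNat = k := by simp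
        rw [hkt, ih g (rest.take k ++ rest.drop (k + 1))
          (by rw [pv_len_child hk]; simp at h1; omega)
          (by rw [pv_len_child hk]; simp at h2; omega)]

-- main invariant: B's while-loop returns the first frame (in stack order) owing a matching
lemma pv_loop_eq (target_p : Int) (el : List (Int × Int × Int)) (bl : List (Int × Int))
    (virt : Int) : ∀ (fuel : Nat) (stack : List (List Int × Int × List (Int × Int))),
    (stack.map (fun st => pvTsz st.1.length)).sum ≤ fuel →
    pvLoopF target_p el bl virt fuel stack = stack.findSome? (pvFrameSpec target_p el bl virt) := by
  intro fuel
  induction fuel with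
  | zero =>
    intro stack h
    cases stack with
    | nil => rfl
    | cons st stack =>
      exfalso
      have := pvTsz_pos st.1.length
      simp at h; omega
  | succ fuel ih =>
    intro stack h
    cases stack with
    | nil => rfl
    | cons st stack =>
      obtain ⟨pool, acc, chosen⟩ := st
      cases pool with
      | nil =>
        have hrec : pvLoopF target_p el bl virt fuel stack
            = stack.findSome? (pvFrameSpec target_p el bl virt) := by
          apply ih; simp [pvTsz] at h ⊢; omega
        simp only [pvLoopF, List.findSome?_cons, pvFrameSpec, pv_gen_nil]
        cases hb : (acc == target_p) <;> simp [List.find?, hb, hrec]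
      | cons first rest =>
        -- B pushes the children; the invariant shifts one level down
        have hchildlen : ∀ im ∈ PySem.List.enumerate rest,
            ((rest.take im.1.toNat ++ rest.drop (im.1.toNat + 1)) : List Int).length
              = rest.length - 1 := by
          intro im him
          obtain ⟨k, hk, rfl⟩ := (PySem.List.mem_enumerate_iff rest 0 im).mp him
          have hkt : ((0 : Int) + (k : Int)).toNat = k := by simp
          rw [hkt, pv_len_child hk]
        have hmeas :
            (((PySem.List.enumerate rest).map (fun im =>
              let uv := if first ≤ im.2 then (first, im.2) else (im.2, first)
              ((rest.take im.1.toNat ++ rest.drop (im.1.toNat + 1) : List Int),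
               PySem.Int.bxor acc (pvWeight el bl virt uv.1 uv.2),
               chosen ++ [uv])) ++ stack).map (fun st => pvTsz st.1.length)).sum ≤ fuel := by
          rw [List.map_append, List.sum_append, List.map_map,
            List.map_congr_left (g := Function.const _ (pvTsz (rest.length - 1)))
              (by intro im him; simp [Function.comp, Function.const, hchildlen im him]),
            List.map_const, List.sum_replicate, PySem.List.length_enumerate, smul_eq_mul]
          simp only [List.map_cons, List.sum_cons, List.length_cons] at h
          cases hr : rest.length with
          | zero => simp [hr, pvTsz] at h ⊢; omega
          | succ r =>
            rw [hr] at h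
            simp only [pvTsz] at h
            simp; omega
        rw [pvLoopF, ih _ hmeas, pv_findSome?_append, List.findSome?_map, List.findSome?_cons]
        -- it remains to show: the children jointly owe exactly what the parent frame owes
        have hchild : (PySem.List.enumerate rest).findSome?
              ((pvFrameSpec target_p el bl virt) ∘ (fun im =>
                let uv := if first ≤ im.2 then (first, im.2) else (im.2, first)
                ((rest.take im.1.toNat ++ rest.drop (im.1.toNat + 1) : List Int),
                 PySem.Int.bxor acc (pvWeight el bl virt uv.1 uv.2),
                 chosen ++ [uv])))
            = pvFrameSpec target_p el bl virt (first :: rest, acc, chosen) := by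
          show _ = ((pvGenMatchingsF (rest.length + 1) (first :: rest)).find? _).map _
          simp only [pvGenMatchingsF, pv_find?_flatMap, pv_map_findSome?]
          apply pv_findSome?_congr
          intro im him
          obtain ⟨k, hk, rfl⟩ := (PySem.List.mem_enumerate_iff rest 0 im).mp him
          have hkt : ((0 : Int) + (k : Int)).toNat = k := by simp
          simp only [Function.comp, pvFrameSpec, hkt, List.find?_map, Option.map_map]
          rw [pv_len_child hk, pv_gen_fuel (rest.length - 1) rest.length _
            (by rw [pv_len_child hk]) (by rw [pv_len_child hk]; omega)]
          by_cases hle : first ≤ rest[k]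
          · simp only [if_pos hle]
            rw [show ((fun m => List.foldl (pvStepA el bl virt) acc m == target_p) ∘
                  fun partial_ => (first, rest[k]) :: partial_)
                = fun m => List.foldl (pvStepA el bl virt)
                    (PySem.Int.bxor acc (pvWeight el bl virt first rest[k])) m == target_p from by
              funext m
              simp only [Function.comp, List.foldl_cons,
                pv_step_sorted el bl virt acc first rest[k] hle]]
            congr 1
            funext m
            simp [Function.comp, List.append_assoc]
          · simp only [if_neg hle]
            rw [show ((fun m => List.foldl (pvStepA el bl virt) acc m == target_p) ∘
                  fun partial_ => (rest[k], first) :: partial_)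
                = fun m => List.foldl (pvStepA el bl virt)
                    (PySem.Int.bxor acc (pvWeight el bl virt rest[k] first)) m == target_p from by
              funext m
              simp only [Function.comp, List.foldl_cons,
                pv_step_sorted el bl virt acc rest[k] first (by omega)]]
            congr 1
            funext m
            simp [Function.comp, List.append_assoc]
        rw [hchild]
        rfl

-- ===== VERDICT (by name: the statement is the Claim_ definition above) =====
theorem solve_cluster_brute_force_spec : Claim_equal_solve_cluster_brute_force := by
  intro nodes target_p el bl virt _
  unfold Spec_solve_cluster_brute_force solve_cluster_brute_force solve_cluster_brute_force_alt
  rw [pv_loop_eq target_p el bl virt (pvTsz nodes.length) [(nodes, 0, [])] (by simp)]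
  simp [pvFrameSpec, pvGetParity]
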